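-- pv_equiv track=rewrite | github.com/RDMaven/NSI-TERM | France_ioi/Niveau4/Debloquage/moustiques.py | pretty_grid_maker
-- ===== SOURCE A (Python) =====
-- def pretty_grid_maker(grid, cases_valides=[]):
--     pretty_grid = []
--     for ligne in range(len(grid)):
--         pretty_line = []
--         for element in range(len(grid[0])):
--             e = grid[ligne][element]
--             if e == 0:
--                 e = str(e)
--                 ep =  f"\033[32;1m0\033[0m"
--
--             else:
--                 e = str(e)
--                 ep = e
--
--             if (ligne, element) in cases_valides:
--                 ep = f"\033[31;1m{str(e)}\033[0m"
--
--             pretty_line.append(ep)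
--         pretty_grid.append(pretty_line)
--     return pretty_grid
-- ===== SOURCE B (Python) =====
-- def pretty_grid_maker(grid, cases_valides=[]):
--     ncols = len(grid[0]) if grid else 0
--     pretty_grid = [["\033[32;1m0\033[0m" if v == 0 else str(v) for v in row[:ncols]]
--                    for row in grid]
--     for (l, e) in cases_valides:
--         if 0 <= l < len(grid) and 0 <= e < ncols:
--             pretty_grid[l][e] = f"\033[31;1m{grid[l][e]}\033[0m"
--     return pretty_grid
-- ===== Notes on version B (the rewrite author's own statement) =====
-- stated objective: faster
-- what changed: A tests (row,col) membership in cases_valides for every cell (a scan per cell); B builds the green/str grid in one pass and then iterates over cases_valides once, overwriting each in-bounds coordinate with the red cell, so the per-cell membership scan disappears.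
import Mathlib
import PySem

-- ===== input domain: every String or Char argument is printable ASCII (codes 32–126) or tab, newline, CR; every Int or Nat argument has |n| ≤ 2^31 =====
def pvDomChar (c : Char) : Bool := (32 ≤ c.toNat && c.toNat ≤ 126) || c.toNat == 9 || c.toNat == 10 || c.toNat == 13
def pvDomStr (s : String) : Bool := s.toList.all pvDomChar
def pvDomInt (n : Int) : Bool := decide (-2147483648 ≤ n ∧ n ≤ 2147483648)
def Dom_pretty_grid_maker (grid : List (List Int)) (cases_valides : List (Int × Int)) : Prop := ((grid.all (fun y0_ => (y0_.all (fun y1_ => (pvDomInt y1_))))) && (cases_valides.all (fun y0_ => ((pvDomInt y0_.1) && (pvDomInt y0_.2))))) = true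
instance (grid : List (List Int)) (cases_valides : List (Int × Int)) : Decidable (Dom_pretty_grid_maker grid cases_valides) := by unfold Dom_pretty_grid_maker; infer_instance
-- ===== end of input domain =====

-- B replaces A's per-cell membership scan of cases_valides by one base pass (green/str)
-- plus one overwrite pass over cases_valides (objective: faster, O(n*m*c) -> O(n*m+c)).

-- ===== PORT A =====
-- Literal port of A. Note: in A, `e = str(e)` before the red branch, so the red cell is
-- always the red wrapping of str(value). pyGetD is exact under Pre_ (indices in range).
def pretty_grid_maker (grid : List (List Int)) (cases_valides : List (Int × Int)) : List (List String) :=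
  (PySem.List.pyRange 0 grid.length 1).foldl
    (fun pretty_grid ligne =>
      let pretty_line :=
        (PySem.List.pyRange 0 (PySem.List.pyGetD grid 0 []).length 1).foldl
          (fun pretty_line element =>
            let e := PySem.List.pyGetD (PySem.List.pyGetD grid ligne []) element 0
            let ep := if e = 0 then "\x1b[32;1m0\x1b[0m" else PySem.Int.toStr e
            let ep := if (ligne, element) ∈ cases_valides
                      then "\x1b[31;1m" ++ PySem.Int.toStr e ++ "\x1b[0m" else ep
            pretty_line ++ [ep])
          []
      pretty_grid ++ [pretty_line])
    []

-- ===== PORT B =====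
-- Literal port of Source B: base grid (row[:ncols] = take ncols), then one pass over
-- cases_valides overwriting in-bounds coordinates.
def pretty_grid_maker_alt (grid : List (List Int)) (cases_valides : List (Int × Int)) : List (List String) :=
  let ncols : Nat := if grid = [] then 0 else (PySem.List.pyGetD grid 0 []).length
  let base : List (List String) :=
    grid.map (fun row =>
      (row.take ncols).map (fun v => if v = 0 then "\x1b[32;1m0\x1b[0m" else PySem.Int.toStr v))
  cases_valides.foldl
    (fun p le =>
      if 0 ≤ le.1 ∧ le.1 < (grid.length : Int) ∧ 0 ≤ le.2 ∧ le.2 < (ncols : Int) then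
        PySem.List.pySetD p le.1
          (PySem.List.pySetD (PySem.List.pyGetD p le.1 []) le.2
            ("\x1b[31;1m" ++
              PySem.Int.toStr (PySem.List.pyGetD (PySem.List.pyGetD grid le.1 []) le.2 0) ++
              "\x1b[0m"))
      else p)
    base

-- ===== PRECONDITION & SPEC =====
-- Pre_ excludes exactly the inputs where A raises IndexError: a grid whose later row is
-- shorter than row 0 (A indexes every row up to len(grid[0])).
def Pre_pretty_grid_maker (grid : List (List Int)) (cases_valides : List (Int × Int)) : Prop :=
  ∀ row ∈ grid, (grid.headD []).length ≤ row.length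
instance (grid : List (List Int)) (cases_valides : List (Int × Int)) : Decidable (Pre_pretty_grid_maker grid cases_valides) := by unfold Pre_pretty_grid_maker; infer_instance
def pvWitness_pretty_grid_maker : List (List Int) × (List (Int × Int)) := ([[0, 3], [5, 0]], [(0, 1), (1, 1)])

def Spec_pretty_grid_maker (grid : List (List Int)) (cases_valides : List (Int × Int)) (out : List (List String)) : Prop := out = pretty_grid_maker_alt grid cases_valides
instance (grid : List (List Int)) (cases_valides : List (Int × Int)) (out : List (List String)) : Decidable (Spec_pretty_grid_maker grid cases_valides out) := by unfold Spec_pretty_grid_maker; infer_instance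

-- ===== CLAIM (what is proved, stated in full; the proofs are below) =====
def Claim_equal_pretty_grid_maker : Prop := ∀ (grid : List (List Int)) (cases_valides : List (Int × Int)), Dom_pretty_grid_maker grid cases_valides → Pre_pretty_grid_maker grid cases_valides → Spec_pretty_grid_maker grid cases_valides (pretty_grid_maker grid cases_valides)

-- ===== LEMMAS AND PROOFS =====

-- Proof-side abbreviations for the three cell strings.
def pvRed (grid : List (List Int)) (li ei : Int) : String :=
  "\x1b[31;1m" ++ PySem.Int.toStr (PySem.List.pyGetD (PySem.List.pyGetD grid li []) ei 0) ++ "\x1b[0m"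

def pvBase (v : Int) : String := if v = 0 then "\x1b[32;1m0\x1b[0m" else PySem.Int.toStr v

def pvCellA (grid : List (List Int)) (cases_valides : List (Int × Int)) (li ei : Int) : String :=
  if (li, ei) ∈ cases_valides then pvRed grid li ei
  else pvBase (PySem.List.pyGetD (PySem.List.pyGetD grid li []) ei 0)

-- A as a double map over ranges.
theorem pvA_shape (grid : List (List Int)) (cases_valides : List (Int × Int)) :
    pretty_grid_maker grid cases_valides =
      (PySem.List.pyRange 0 (grid.length : Int) 1).map (fun li =>
        (PySem.List.pyRange 0 ((PySem.List.pyGetD grid 0 []).length : Int) 1).map (fun ei =>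
          pvCellA grid cases_valides li ei)) := by
  simp only [pretty_grid_maker, PySem.List.foldl_append_singleton_eq_map, List.nil_append]
  refine List.map_congr_left (fun li _ => ?_)
  refine List.map_congr_left (fun ei _ => ?_)
  rfl

-- B's update step, as the port's lambda.
def pvUpd (grid : List (List Int)) (m : Nat) (p : List (List String)) (le : Int × Int) :
    List (List String) :=
  if 0 ≤ le.1 ∧ le.1 < (grid.length : Int) ∧ 0 ≤ le.2 ∧ le.2 < (m : Int) then
    PySem.List.pySetD p le.1
      (PySem.List.pySetD (PySem.List.pyGetD p le.1 []) le.2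
        ("\x1b[31;1m" ++
          PySem.Int.toStr (PySem.List.pyGetD (PySem.List.pyGetD grid le.1 []) le.2 0) ++
          "\x1b[0m"))
  else p

theorem pvB_shape (grid : List (List Int)) (cases_valides : List (Int × Int)) :
    pretty_grid_maker_alt grid cases_valides =
      cases_valides.foldl
        (pvUpd grid (if grid = [] then 0 else (PySem.List.pyGetD grid 0 []).length))
        (grid.map (fun row =>
          (row.take (if grid = [] then 0 else (PySem.List.pyGetD grid 0 []).length)).map pvBase)) := by
  rfl

theorem pv_ncols_if (grid : List (List Int)) :
    (if grid = [] then 0 else (PySem.List.pyGetD grid 0 []).length)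
      = (PySem.List.pyGetD grid 0 []).length := by
  cases grid <;> simp [PySem.List.pyGetD_zero]

-- one update step: lengths preserved
theorem pvUpd_length (grid : List (List Int)) (m : Nat) (p : List (List String))
    (c : Int × Int) : (pvUpd grid m p c).length = p.length := by
  unfold pvUpd
  split_ifs with h
  · rw [PySem.List.pySetD_of_nonneg _ _ h.1, List.length_set]
  · rfl

theorem pvUpd_row_length (grid : List (List Int)) (m : Nat) (p : List (List String))
    (c : Int × Int) (hlen : p.length = grid.length)
    (hrow : ∀ l : Nat, l < grid.length → (p.getD l []).length = m)
    (l : Nat) (hl : l < grid.length) : ((pvUpd grid m p c).getD l []).length = m := by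
  unfold pvUpd
  split_ifs with h
  · have e1 : c.1 = ((c.1.toNat : Nat) : Int) := by omega
    have e2 : c.2 = ((c.2.toNat : Nat) : Int) := by omega
    rw [PySem.List.pySetD_of_nonneg _ _ h.1, e1, PySem.List.pyGetD_natCast,
      PySem.List.pySetD_of_nonneg _ _ h.2.2.1]
    simp only [Int.toNat_natCast]
    rw [List.getD_eq_getElem?_getD, List.getElem?_set]
    by_cases hc : c.1.toNat = l
    · have hlt : c.1.toNat < p.length := by omega
      rw [if_pos hc, if_pos (hc ▸ hlt), Option.getD_some, List.length_set]
      rw [hc]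
      exact hrow l hl
    · rw [if_neg hc, ← List.getD_eq_getElem?_getD]
      exact hrow l hl
  · exact hrow l hl

-- one update step: cell values
theorem pvUpd_getD (grid : List (List Int)) (m : Nat) (p : List (List String))
    (c : Int × Int) (hlen : p.length = grid.length)
    (hrow : ∀ l : Nat, l < grid.length → (p.getD l []).length = m)
    (l e : Nat) (hl : l < grid.length) (he : e < m) :
    ((pvUpd grid m p c).getD l []).getD e "" =
      if c = ((l : Int), (e : Int)) then pvRed grid l e else (p.getD l []).getD e "" := by
  unfold pvUpd
  split_ifs with h hc hc
  · -- guard true, c = (l, e)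
    have h1 : c.1 = (l : Int) := by rw [hc]
    have h2 : c.2 = (e : Int) := by rw [hc]
    have hlt : l < p.length := by omega
    have helt : e < (p.getD l []).length := by rw [hrow l hl]; omega
    rw [PySem.List.pySetD_of_nonneg _ _ h.1, h1, PySem.List.pyGetD_natCast,
      PySem.List.pySetD_of_nonneg _ _ h.2.2.1, h2]
    simp only [Int.toNat_natCast]
    have helt' : e < (p[l]'hlt).length := by
      simpa [List.getD_eq_getElem?_getD, List.getElem?_eq_getElem hlt] using helt
    simp [List.getD_eq_getElem?_getD, hlt, helt', pvRed]
  · -- guard true, c ≠ (l, e)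
    have e1 : c.1 = ((c.1.toNat : Nat) : Int) := by omega
    rw [PySem.List.pySetD_of_nonneg _ _ h.1, e1, PySem.List.pyGetD_natCast,
      PySem.List.pySetD_of_nonneg _ _ h.2.2.1]
    simp only [Int.toNat_natCast]
    by_cases hc1 : c.1.toNat = l
    · have hlt : c.1.toNat < p.length := by omega
      have hc2 : ¬ (c.2.toNat = e) := by
        intro hc2
        exact hc (Prod.ext (by omega) (by omega))
      have hlt' : l < p.length := hc1 ▸ hlt
      simp [List.getD_eq_getElem?_getD, hc1, hlt', hc2]
    · simp [List.getD_eq_getElem?_getD, hc1]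
  · -- guard false, but c = (l, e): impossible
    exfalso
    apply h
    rw [hc]
    refine ⟨Int.natCast_nonneg l, ?_, Int.natCast_nonneg e, ?_⟩ <;> exact_mod_cast (by omega)
  · rfl

-- the whole overwrite pass, characterised pointwise
theorem pvFoldl_upd (grid : List (List Int)) (m : Nat) :
    ∀ (cs : List (Int × Int)) (p : List (List String)),
    p.length = grid.length →
    (∀ l : Nat, l < grid.length → (p.getD l []).length = m) →
    (cs.foldl (pvUpd grid m) p).length = grid.length ∧
    (∀ l : Nat, l < grid.length → ((cs.foldl (pvUpd grid m) p).getD l []).length = m) ∧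
    (∀ l e : Nat, l < grid.length → e < m →
      ((cs.foldl (pvUpd grid m) p).getD l []).getD e "" =
        if ((l : Int), (e : Int)) ∈ cs then pvRed grid l e else (p.getD l []).getD e "") := by
  intro cs
  induction cs with
  | nil => intro p h1 h2; simpa using ⟨h1, h2⟩
  | cons c cs ih =>
    intro p h1 h2
    have h1' : (pvUpd grid m p c).length = grid.length := by rw [pvUpd_length, h1]
    have h2' : ∀ l : Nat, l < grid.length → ((pvUpd grid m p c).getD l []).length = m :=
      pvUpd_row_length grid m p c h1 h2
    obtain ⟨g1, g2, g3⟩ := ih (pvUpd grid m p c) h1' h2'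
    refine ⟨g1, g2, fun l e hl he => ?_⟩
    rw [List.foldl_cons, g3 l e hl he, pvUpd_getD grid m p c h1 h2 l e hl he]
    by_cases hin : ((l : Int), (e : Int)) ∈ cs
    · simp [hin]
    · by_cases hc : c = ((l : Int), (e : Int))
      · simp [hin, hc]
      · have hne : ¬ ((l : Int), (e : Int)) = c := fun hh => hc hh.symm
        simp [hin, hc, hne]

-- ===== VERDICT (by name: the statement is the Claim_ definition above) =====
theorem pretty_grid_maker_spec : Claim_equal_pretty_grid_maker := by
  intro grid cases_valides _ hpre
  unfold Spec_pretty_grid_maker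
  set m : Nat := (PySem.List.pyGetD grid 0 []).length with hm
  have hmrow : ∀ row ∈ grid, m ≤ row.length := by
    intro row hr
    have := hpre row hr
    cases grid with
    | nil => cases hr
    | cons x xs => simpa [hm, PySem.List.pyGetD_zero] using this
  rw [pvA_shape, pvB_shape, pv_ncols_if]
  have hbase_len : (grid.map (fun row => (row.take m).map pvBase)).length = grid.length := by
    simp
  have hbase_row : ∀ l : Nat, l < grid.length →
      ((grid.map (fun row => (row.take m).map pvBase)).getD l []).length = m := by
    intro l hl
    rw [List.getD_eq_getElem?_getD, List.getElem?_map, List.getElem?_eq_getElem hl]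
    simp only [Option.map_some, Option.getD_some, List.length_map, List.length_take]
    have := hmrow grid[l] (List.getElem_mem hl)
    omega
  obtain ⟨g1, g2, g3⟩ := pvFoldl_upd grid m cases_valides _ hbase_len hbase_row
  set B := List.foldl (pvUpd grid m) (grid.map fun row => (row.take m).map pvBase) cases_valides with hB
  refine List.ext_getElem ?_ ?_
  · rw [List.length_map, PySem.List.length_pyRange_one, g1]; omega
  · intro l hA hBl
    have hl : l < grid.length := by
      rw [List.length_map, PySem.List.length_pyRange_one] at hA; omega
    refine List.ext_getElem ?_ ?_
    · rw [List.getElem_map, List.length_map, PySem.List.length_pyRange_one,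
        ← List.getD_eq_getElem B [] hBl, g2 l hl]
      omega
    · intro e heA heB
      have he : e < m := by
        rw [List.getElem_map, List.length_map, PySem.List.length_pyRange_one] at heA; omega
      have heB' : e < (B.getD l []).length := by rw [g2 l hl]; omega
      simp only [List.getElem_map, PySem.List.getElem_pyRange_one]
      have hBe : (B.getD l []).getD e "" = B[l][e] := by
        have h1 := List.getD_eq_getElem B [] hBl
        rw [h1]
        exact List.getD_eq_getElem _ "" (h1 ▸ heB')
      rw [← hBe, g3 l e hl he]
      have hml : m ≤ grid[l].length := hmrow grid[l] (List.getElem_mem hl)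
      have hbv : ((grid.map (fun row => (row.take m).map pvBase)).getD l []).getD e "" =
          pvBase (PySem.List.pyGetD (PySem.List.pyGetD grid (0 + (l : Int)) [])
            (0 + (e : Int)) 0) := by
        have hrowv : (grid.map (fun row => (row.take m).map pvBase)).getD l []
            = (grid[l].take m).map pvBase := by
          rw [List.getD_eq_getElem _ [] (by simpa using hl)]
          simp
        rw [hrowv, List.getD_eq_getElem?_getD, List.getElem?_map,
          List.getElem?_take_of_lt he, List.getElem?_eq_getElem (by omega)]
        simp only [Option.map_some, Option.getD_some]
        have hz : (0 : Int) + (l : Int) = ((l : Nat) : Int) := by omega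
        have hz2 : (0 : Int) + (e : Int) = ((e : Nat) : Int) := by omega
        rw [hz, hz2]
        simp only [PySem.List.pyGetD_natCast]
        rw [List.getD_eq_getElem grid [] hl, List.getD_eq_getElem grid[l] 0 (by omega)]
      rw [hbv]
      simp only [pvCellA]
      have hz : (0 : Int) + (l : Int) = ((l : Nat) : Int) := by omega
      have hz2 : (0 : Int) + (e : Int) = ((e : Nat) : Int) := by omega
      rw [hz, hz2]
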